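-- pv_equiv track=rewrite | github.com/SuhyunRim118/Algorithm | 프로그래머스/3/70130. 스타 수열/스타 수열.py | solution
-- ===== SOURCE A (Python) =====
-- from collections import Counter
--
-- def solution(a):
--     answer = -1
--
--     a_cnt = Counter(a)
--
--     for num in a_cnt.keys():
--
--         if a_cnt[num] <= answer:
--             continue
--
--         cnt = 0
--         idx = 0
--
--         while idx < len(a)-1:
--
--             if (a[idx]!=num and a[idx+1]!=num) or (a[idx]==a[idx+1]):
--                 idx+=1
--                 continue
--
--             idx+=2
--             cnt+=1
--
--         answer = max(answer, cnt)
--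
--     return 0 if answer==-1 else answer*2
-- ===== SOURCE B (Python) =====
-- from collections import Counter
--
-- def solution(a):
--     answer = -1
--     a_cnt = Counter(a)
--     n = len(a)
--     for num in a_cnt.keys():
--         if a_cnt[num] <= answer:
--             continue
--         # right-to-left DP: prev1 = best star-pair matching of a[i+1:], prev2 = of a[i+2:]
--         prev2 = 0
--         prev1 = 0
--         for i in range(n - 2, -1, -1):
--             e = 1 if (a[i] == num) != (a[i + 1] == num) else 0
--             cur = max(prev1, e + prev2)
--             prev2, prev1 = prev1, cur
--         answer = max(answer, prev1)
--     return 0 if answer == -1 else answer * 2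
-- ===== Notes on version B (the rewrite author's own statement) =====
-- stated objective: alternative
-- what changed: The inner leftmost-greedy advance-by-2 index scan is replaced by a right-to-left two-accumulator dynamic program computing the maximum matching on the star-pair path (cur = max(prev1, edge + prev2)), equal to the greedy count because leftmost greedy matching on a path is optimal.
import Mathlib
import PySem

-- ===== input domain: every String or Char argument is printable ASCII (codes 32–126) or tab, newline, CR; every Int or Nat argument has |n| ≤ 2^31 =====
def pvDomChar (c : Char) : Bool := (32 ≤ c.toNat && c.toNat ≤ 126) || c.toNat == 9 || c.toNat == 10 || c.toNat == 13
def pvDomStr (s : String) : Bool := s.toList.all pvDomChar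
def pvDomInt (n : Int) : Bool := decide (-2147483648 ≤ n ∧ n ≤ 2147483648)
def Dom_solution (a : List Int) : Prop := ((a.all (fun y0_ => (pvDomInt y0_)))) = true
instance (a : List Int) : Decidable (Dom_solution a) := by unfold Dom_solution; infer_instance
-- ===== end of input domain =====

-- B replaces A's inner leftmost-greedy advance-by-2 scan with a right-to-left two-accumulator
-- dynamic program for the maximum matching on the star-pair path (alternative decomposition, same cost).

-- ===== PORT A =====
-- the while loop: idx advances by 1 (skip) or 2 (take a pair); fuel = a.length bounds the
-- iteration count (each step consumes one fuel and the loop runs at most a.length steps),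
-- so the fuel guard never fires on the call below — it only makes the recursion structural
def solutionLoopA (a : List Int) (num : Int) (fuel idx : Nat) (cnt : Int) : Int :=
  match fuel with
  | 0 => cnt
  | fuel + 1 =>
    if idx < a.length - 1 then
      if (PySem.List.pyGetD a idx 0 ≠ num ∧ PySem.List.pyGetD a (idx+1) 0 ≠ num)
          ∨ PySem.List.pyGetD a idx 0 = PySem.List.pyGetD a (idx+1) 0 then
        solutionLoopA a num fuel (idx+1) cnt
      else
        solutionLoopA a num fuel (idx+2) (cnt+1)
    else cnt

def solution (a : List Int) : Int :=
  let a_cnt := PySem.Dict.counter a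
  let answer := a_cnt.keys.foldl (fun answer num =>
    if a_cnt.getD num 0 ≤ answer then answer
    else max answer (solutionLoopA a num a.length 0 0)) (-1)
  if answer = -1 then 0 else answer * 2

-- ===== PORT B =====
-- the body of B's inner DP loop (one step of the right-to-left sweep)
def stepB (a : List Int) (num : Int) : Int × Int → Int → Int × Int :=
  fun st i =>
    let e : Int := if decide (PySem.List.pyGetD a i 0 = num) != decide (PySem.List.pyGetD a (i+1) 0 = num) then 1 else 0
    (st.2, max st.2 (e + st.1))

def solution_alt (a : List Int) : Int :=
  let a_cnt := PySem.Dict.counter a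
  let n : Int := a.length
  let answer := a_cnt.keys.foldl (fun answer num =>
    if a_cnt.getD num 0 ≤ answer then answer
    else
      let st := (PySem.List.pyRange (n - 2) (-1) (-1)).foldl (stepB a num) ((0 : Int), (0 : Int))
      max answer st.2) (-1)
  if answer = -1 then 0 else answer * 2

-- ===== PRECONDITION & SPEC =====
def Spec_solution (a : List Int) (out : Int) : Prop := out = solution_alt a
instance (a : List Int) (out : Int) : Decidable (Spec_solution a out) := by unfold Spec_solution; infer_instance

-- ===== CLAIM (what is proved, stated in full; the proofs are below) =====
def Claim_equal_solution : Prop := ∀ (a : List Int), Dom_solution a → Spec_solution a (solution a)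

-- ===== LEMMAS AND PROOFS =====

-- star-pair edge between two adjacent elements, relative to pivot num
def eB (num x y : Int) : Bool := decide (x = num) != decide (y = num)

-- A's greedy count, as structural recursion on the list
def gMatch (num : Int) : List Int → Int
  | x :: y :: r => if eB num x y then 1 + gMatch num r else gMatch num (y :: r)
  | _ => 0

-- B's DP value: maximum matching on the star-pair path
def mMatch (num : Int) : List Int → Int
  | x :: y :: r => max (mMatch num (y :: r)) ((if eB num x y then (1:Int) else 0) + mMatch num r)
  | _ => 0

lemma mMatch_le_cons (num y : Int) (r : List Int) : mMatch num r ≤ mMatch num (y :: r) := by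
  cases r with
  | nil => simp [mMatch]
  | cons z r' => exact le_max_left _ _

lemma mMatch_cons_le (num y : Int) (r : List Int) : mMatch num (y :: r) ≤ 1 + mMatch num r := by
  cases r with
  | nil => simp [mMatch]
  | cons z r' =>
    simp only [mMatch, max_le_iff]
    constructor
    · have := mMatch_le_cons num z r'
      omega
    · have := mMatch_le_cons num z r'
      split <;> omega

lemma gMatch_eq_mMatch (num : Int) (l : List Int) : gMatch num l = mMatch num l := by
  induction l using gMatch.induct num with
  | case1 x y r htrue ih =>
    have h1 := mMatch_cons_le num y r
    simp [gMatch, mMatch, htrue, ih]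
    omega
  | case2 x y r hfalse ih =>
    have h2 := mMatch_le_cons num y r
    simp [gMatch, mMatch, hfalse, ih]
    omega
  | case3 l h1 =>
    match l, h1 with
    | [], _ => rfl
    | [x], _ => rfl
    | x :: y :: r, h1 => exact (h1 x y r rfl).elim

lemma short_gMatch (num : Int) (l : List Int) (h : l.length ≤ 1) : gMatch num l = 0 := by
  match l, h with
  | [], _ => rfl
  | [x], _ => rfl

-- A's greedy cond ↔ no edge
lemma condA_iff (num x y : Int) :
    ((x ≠ num ∧ y ≠ num) ∨ x = y) ↔ eB num x y = false := by
  by_cases hx : x = num <;> by_cases hy : y = num <;> simp [eB, hx, hy] <;> omega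

lemma pyGetD_elem (a : List Int) (i : Nat) (h : i < a.length) :
    PySem.List.pyGetD a (i:Int) 0 = a[i] := by
  rw [PySem.List.pyGetD_natCast]
  exact List.getD_eq_getElem a 0 h

lemma loopA_eq (a : List Int) (num : Int) : ∀ (fuel idx : Nat) (cnt : Int),
    a.length - 1 ≤ idx + fuel →
    solutionLoopA a num fuel idx cnt = cnt + gMatch num (a.drop idx) := by
  intro fuel
  induction fuel with
  | zero =>
    intro idx cnt hf
    rw [solutionLoopA, short_gMatch num _ (by simp only [List.length_drop]; omega)]
    omega
  | succ fuel ih =>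
    intro idx cnt hf
    rw [solutionLoopA]
    by_cases h : idx < a.length - 1
    · rw [if_pos h]
      have hd1 : a.drop idx = a[idx] :: a.drop (idx+1) := List.drop_eq_getElem_cons (by omega)
      have hd2 : a.drop (idx+1) = a[idx+1] :: a.drop (idx+2) := List.drop_eq_getElem_cons (by omega)
      by_cases hc : (PySem.List.pyGetD a idx 0 ≠ num ∧ PySem.List.pyGetD a (idx+1) 0 ≠ num)
          ∨ PySem.List.pyGetD a idx 0 = PySem.List.pyGetD a (idx+1) 0
      · rw [if_pos hc, ih (idx+1) cnt (by omega)]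
        rw [show ((idx:Int)+1) = ((idx+1 : Nat) : Int) by push_cast; ring] at hc
        rw [pyGetD_elem a idx (by omega), pyGetD_elem a (idx+1) (by omega)] at hc
        have he : eB num (a[idx]'(by omega)) (a[idx+1]'(by omega)) = false := (condA_iff _ _ _).mp hc
        rw [hd1, hd2, gMatch, he]
        simp [← hd2]
      · rw [if_neg hc, ih (idx+2) (cnt+1) (by omega)]
        rw [show ((idx:Int)+1) = ((idx+1 : Nat) : Int) by push_cast; ring] at hc
        rw [pyGetD_elem a idx (by omega), pyGetD_elem a (idx+1) (by omega)] at hc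
        have he : eB num (a[idx]'(by omega)) (a[idx+1]'(by omega)) = true := by
          rcases Bool.eq_false_or_eq_true (eB num (a[idx]'(by omega)) (a[idx+1]'(by omega))) with h' | h'
          · exact h'
          · exact absurd ((condA_iff _ _ _).mpr h') hc
        rw [hd1, hd2, gMatch, he]
        simp
        omega
    · rw [if_neg h, short_gMatch num _ (by simp only [List.length_drop]; omega)]
      omega

lemma foldB_eq (a : List Int) (num : Int) : ∀ (k : Nat), k + 1 ≤ a.length →
    (PySem.List.pyRange ((k:Int) - 1) (-1) (-1)).foldl (stepB a num)
      (mMatch num (a.drop (k+1)), mMatch num (a.drop k))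
    = (mMatch num (a.drop 1), mMatch num (a.drop 0)) := by
  intro k
  induction k with
  | zero =>
    intro _
    rw [PySem.List.pyRange_neg_one_eq_nil (by omega)]
    rfl
  | succ k ih =>
    intro hk
    have hcons : PySem.List.pyRange ((k:Int) + 1 - 1) (-1) (-1)
        = ((k:Int)) :: PySem.List.pyRange ((k:Int) - 1) (-1) (-1) := by
      have := PySem.List.pyRange_neg_one_cons (a := (k:Int)) (b := -1) (by omega)
      simpa using this
    push_cast
    rw [hcons, List.foldl_cons]
    have hd1 : a.drop k = a[k] :: a.drop (k+1) := List.drop_eq_getElem_cons (by omega)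
    have hd2 : a.drop (k+1) = a[k+1] :: a.drop (k+2) := List.drop_eq_getElem_cons (by omega)
    have hg1 : PySem.List.pyGetD a (k:Int) 0 = a[k]'(by omega) := by
      rw [PySem.List.pyGetD_natCast]
      exact List.getD_eq_getElem a 0 (by omega)
    have hg2 : PySem.List.pyGetD a ((k:Int)+1) 0 = a[k+1]'(by omega) := by
      have hc : ((k:Int)+1) = ((k+1 : Nat) : Int) := by push_cast; ring
      rw [hc, PySem.List.pyGetD_natCast]
      exact List.getD_eq_getElem a 0 (by omega)
    have hstep : stepB a num (mMatch num (a.drop (k+1+1)), mMatch num (a.drop (k+1))) (k:Int)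
        = (mMatch num (a.drop (k+1)), mMatch num (a.drop k)) := by
      simp only [stepB, hg1, hg2]
      congr 1
      rw [hd1, hd2, mMatch, ← hd2]
      rfl
    rw [hstep]
    exact ih (by omega)

-- per-pivot: B's DP fold result equals A's greedy count
lemma inner_eq (a : List Int) (num : Int) :
    ((PySem.List.pyRange ((a.length : Int) - 2) (-1) (-1)).foldl (stepB a num) ((0:Int), (0:Int))).2
    = solutionLoopA a num a.length 0 0 := by
  rw [loopA_eq a num a.length 0 0 (by omega)]
  simp only [List.drop_zero, zero_add]
  rw [gMatch_eq_mMatch]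
  cases a with
  | nil =>
    rw [PySem.List.pyRange_neg_one_eq_nil (by norm_num)]
    rfl
  | cons x rest =>
    have h0 : mMatch num ((x :: rest).drop (((x :: rest).length - 1) + 1)) = 0 := by
      have hh : ((x :: rest).length - 1) + 1 = (x :: rest).length := by simp
      rw [hh, List.drop_length]; rfl
    have h1 : mMatch num ((x :: rest).drop ((x :: rest).length - 1)) = 0 := by
      rw [← gMatch_eq_mMatch]
      apply short_gMatch
      simp only [List.length_drop]; omega
    have hrange : (((x :: rest).length : Int) - 2) = ((((x :: rest).length - 1 : Nat)) : Int) - 1 := by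
      simp only [List.length_cons]
      push_cast
      omega
    have hfb := foldB_eq (x :: rest) num ((x :: rest).length - 1) (by simp)
    rw [h0, h1] at hfb
    rw [hrange, hfb]
    simp

-- the two outer folds agree key by key
lemma fold_eq (a : List Int) :
    (PySem.Dict.counter a).keys.foldl (fun answer num =>
      if (PySem.Dict.counter a).getD num 0 ≤ answer then answer
      else max answer (solutionLoopA a num a.length 0 0)) (-1)
    = (PySem.Dict.counter a).keys.foldl (fun answer num =>
      if (PySem.Dict.counter a).getD num 0 ≤ answer then answer
      else max answer (((PySem.List.pyRange ((a.length : Int) - 2) (-1) (-1)).foldl (stepB a num) ((0:Int), (0:Int))).2)) (-1) := by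
  apply PySem.List.foldl_congr_mem
  intro acc num hmem
  by_cases h : (PySem.Dict.counter a).getD num 0 ≤ acc
  · rw [if_pos h, if_pos h]
  · rw [if_neg h, if_neg h, inner_eq a num]

-- ===== VERDICT (by name: the statement is the Claim_ definition above) =====
theorem solution_spec : Claim_equal_solution := by
  intro a _
  unfold Spec_solution solution solution_alt
  simp only []
  rw [fold_eq]
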